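-- pv_equiv track=rewrite | github.com/evilrobotjames/evilrobotjames | advent-of-code-2020/6/6-2.py | letters_in_every_person
-- ===== SOURCE A (Python) =====
-- def get_unique_letters(group):
--     unique_letters = set()
--     for person in group:
--         for letter in person:
--             unique_letters.add(letter)
--     return unique_letters
--
-- def letters_in_every_person(group):
--     letters_to_try = get_unique_letters(group)
--     letters_in_all = set(letters_to_try)
--     for letter in letters_to_try:
--         for person in group:
--             if letter not in person:
--                 if letter in letters_in_all:
--                     letters_in_all.remove(letter)
--     return letters_in_all
-- ===== SOURCE B (Python) =====
-- def letters_in_every_person(group):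
--     if not group:
--         return set()
--     common = set(group[0])
--     for person in group[1:]:
--         common &= set(person)
--     return common
-- ===== Notes on version B (the rewrite author's own statement) =====
-- stated objective: alternative
-- what changed: Instead of collecting all letters of the group and then scanning every person for every letter with substring tests, B folds a set intersection of the per-person character sets in one pass over the group.
import Mathlib
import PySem

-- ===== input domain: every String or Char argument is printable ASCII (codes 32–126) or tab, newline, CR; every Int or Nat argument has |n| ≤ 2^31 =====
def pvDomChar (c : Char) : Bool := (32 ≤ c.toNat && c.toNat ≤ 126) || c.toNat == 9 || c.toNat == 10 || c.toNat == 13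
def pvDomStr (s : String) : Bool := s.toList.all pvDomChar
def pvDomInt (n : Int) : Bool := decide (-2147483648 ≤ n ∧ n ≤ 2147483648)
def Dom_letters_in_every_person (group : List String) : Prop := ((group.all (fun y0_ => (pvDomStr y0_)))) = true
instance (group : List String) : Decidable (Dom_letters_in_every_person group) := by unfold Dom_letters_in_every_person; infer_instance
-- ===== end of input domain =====

-- B replaces A's per-letter scan over every person (substring tests) by a single
-- fold intersecting the per-person character sets; one pass over the input.

-- ===== PORT A =====
def pvGetUniqueLetters (group : List String) : PySem.Set String :=
  group.foldl
    (fun s person =>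
      person.toList.foldl (fun s letter => PySem.Set.add s (String.ofList [letter])) s)
    PySem.Set.empty

def letters_in_every_person (group : List String) : List String :=
  let letters_to_try := pvGetUniqueLetters group
  letters_to_try.foldl
    (fun acc letter =>
      group.foldl
        (fun acc person =>
          if !(PySem.Str.isIn letter person) then
            if PySem.Set.contains acc letter then (PySem.Set.remove? acc letter).getD acc
            else acc
          else acc)
        acc)
    (PySem.Set.ofList letters_to_try)

-- ===== PORT B =====
-- set(person): the distinct one-character strings of person, first-occurrence order
def pvCharSet (person : String) : PySem.Set String :=
  PySem.Set.ofList (person.toList.map (fun c => String.ofList [c]))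

def letters_in_every_person_alt (group : List String) : List String :=
  match group with
  | [] => PySem.Set.empty
  | p :: rest =>
      rest.foldl (fun common person => PySem.Set.inter common (pvCharSet person)) (pvCharSet p)

-- ===== PRECONDITION & SPEC =====
def Spec_letters_in_every_person (group : List String) (out : List String) : Prop := out = letters_in_every_person_alt group
instance (group : List String) (out : List String) : Decidable (Spec_letters_in_every_person group out) := by unfold Spec_letters_in_every_person; infer_instance

-- ===== CLAIM (what is proved, stated in full; the proofs are below) =====
def Claim_equal_letters_in_every_person : Prop := ∀ (group : List String), Dom_letters_in_every_person group → Spec_letters_in_every_person group (letters_in_every_person group)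

-- ===== LEMMAS AND PROOFS =====

-- the letters of one person, as one-character strings, in order
def pvChars (p : String) : List String := p.toList.map (fun c => String.ofList [c])

theorem pv_inf_of_mem (c : Char) (l : List Char) : c ∈ l → ([c] <:+: l) := by
  intro h
  obtain ⟨s, t, rfl⟩ := List.append_of_mem h
  exact ⟨s, t, by simp⟩

theorem pv_isIn_singleton (c : Char) (l : List Char) :
    PySem.Chars.isIn [c] l = l.contains c := by
  by_cases hc : c ∈ l
  · rw [(PySem.Chars.isIn_iff_infix _ _).mpr (pv_inf_of_mem c l hc)]
    simp [hc]
  · rw [(PySem.Chars.isIn_eq_false_iff _ _).mpr (fun h => hc (h.mem (by simp)))]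
    simp [hc]

theorem pv_mem_chars (x : String) (p : String) :
    x ∈ pvChars p ↔ ∃ c ∈ p.toList, x = String.ofList [c] := by
  simp [pvChars, eq_comm]

theorem pv_isIn_chars (c : Char) (p : String) :
    PySem.Str.isIn (String.ofList [c]) p = true ↔ c ∈ p.toList := by
  rw [show PySem.Str.isIn (String.ofList [c]) p = PySem.Chars.isIn [c] p.toList by simp]
  rw [pv_isIn_singleton]
  simp

theorem pv_mem_charSet (c : Char) (p : String) :
    String.ofList [c] ∈ pvCharSet p ↔ c ∈ p.toList := by
  unfold pvCharSet
  rw [PySem.Set.mem_ofList]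
  constructor
  · intro h
    simp only [List.mem_map] at h
    obtain ⟨d, hd, hde⟩ := h
    have hdc : [d] = [c] := by
      have := congrArg String.toList hde; simpa using this
    have : d = c := by injection hdc
    exact this ▸ hd
  · intro h
    exact List.mem_map.mpr ⟨c, h, rfl⟩

-- A's unique-letter collection is the deduped concatenation of per-person letters
theorem pv_unique_eq (group : List String) :
    pvGetUniqueLetters group = PySem.Set.ofList (group.flatMap pvChars) := by
  have gen : ∀ (g : List String) (s : PySem.Set String),
      g.foldl
        (fun s person =>
          person.toList.foldl (fun s letter => PySem.Set.add s (String.ofList [letter])) s) s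
      = PySem.Set.update s (g.flatMap pvChars) := by
    intro g
    induction g with
    | nil => intro s; simp [PySem.Set.update_nil]
    | cons p rest ih =>
        intro s
        have h1 : p.toList.foldl (fun s letter => PySem.Set.add s (String.ofList [letter])) s
            = PySem.Set.update s (pvChars p) :=
          (PySem.Set.update_map_eq_foldl_add p.toList (fun c => String.ofList [c]) s).symm
        simp only [List.foldl_cons, h1, ih, List.flatMap_cons]
        rw [PySem.Set.update_append]
  unfold pvGetUniqueLetters
  rw [gen group PySem.Set.empty]
  rfl

-- the guarded remove in A's inner loop is exactly set.discard
theorem pv_remove_step (acc : PySem.Set String) (letter : String) :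
    (if PySem.Set.contains acc letter then (PySem.Set.remove? acc letter).getD acc else acc)
      = PySem.Set.discard acc letter := by
  by_cases h : letter ∈ acc
  · rw [if_pos ((PySem.Set.contains_iff acc letter).mpr h), PySem.Set.remove?_of_mem h]
    rfl
  · rw [if_neg (fun hc => h ((PySem.Set.contains_iff acc letter).mp hc))]
    unfold PySem.Set.discard
    refine (List.filter_eq_self.mpr (fun y hy => ?_)).symm
    have hne : y ≠ letter := fun he => h (he ▸ hy)
    simp [hne]

theorem pv_discard_discard (acc : PySem.Set String) (l : String) :
    PySem.Set.discard (PySem.Set.discard acc l) l = PySem.Set.discard acc l := by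
  unfold PySem.Set.discard
  rw [List.filter_filter]
  simp

-- A's inner loop over the group: keep acc if every person has the letter, else discard it
theorem pv_inner (letter : String) :
    ∀ (g : List String) (acc : PySem.Set String),
      g.foldl (fun acc person =>
          if !(PySem.Str.isIn letter person) then PySem.Set.discard acc letter else acc) acc
      = if g.all (fun person => PySem.Str.isIn letter person) then acc
        else PySem.Set.discard acc letter := by
  intro g
  induction g with
  | nil => intro acc; simp
  | cons person rest ih =>
      intro acc
      rw [List.foldl_cons]
      by_cases hp : PySem.Str.isIn letter person = true
      · rw [if_neg (by simpa using hp), ih acc, List.all_cons, hp, Bool.true_and]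
      · simp only [Bool.not_eq_true] at hp
        rw [if_pos (by simpa using hp), ih (PySem.Set.discard acc letter), pv_discard_discard,
          ite_self, List.all_cons, hp, Bool.false_and, if_neg (by simp)]

-- folding "discard unless kept" over any list is a filter
theorem pv_outer (q : String → Bool) :
    ∀ (letters acc : List String),
      letters.foldl (fun acc l => if q l then acc else PySem.Set.discard acc l) acc
      = acc.filter (fun x => q x || !(letters.contains x)) := by
  intro letters
  induction letters with
  | nil => intro acc; simp
  | cons l ls ih =>
      intro acc
      rw [List.foldl_cons, ih]
      by_cases hq : q l
      · rw [if_pos hq]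
        refine List.filter_congr (fun x _ => ?_)
        by_cases hxl : x = l
        · subst hxl; simp [hq]
        · simp [hxl]
      · rw [if_neg hq]
        unfold PySem.Set.discard
        rw [List.filter_filter]
        refine List.filter_congr (fun x _ => ?_)
        by_cases hxl : x = l
        · subst hxl; simp [hq]
        · simp [hxl]

-- A's value: the deduped letters of the whole group that every person contains
theorem pv_A_filter (group : List String) :
    letters_in_every_person group
      = (PySem.Set.ofList (group.flatMap pvChars)).filter
          (fun x => group.all (fun person => PySem.Str.isIn x person)) := by
  unfold letters_in_every_person
  simp only [pv_remove_step]
  simp only [pv_inner]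
  simp only [pv_outer]
  simp only [pv_unique_eq]
  rw [PySem.Set.ofList_eq_self_of_nodup _ (PySem.Set.nodup_ofList _)]
  refine List.filter_congr (fun x hx => ?_)
  have hcx : List.contains (PySem.Set.ofList (group.flatMap pvChars)) x = true := by
    simpa using hx
  rw [hcx, Bool.not_true, Bool.or_false]

theorem pv_inter_def (s t : PySem.Set String) :
    PySem.Set.inter s t = s.filter (fun x => PySem.Set.contains t x) := rfl

-- B's fold of intersections is a filter of the first person's character set
theorem pv_B_filter :
    ∀ (rest : List String) (init : PySem.Set String),
      rest.foldl (fun common person => PySem.Set.inter common (pvCharSet person)) init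
      = init.filter (fun x => rest.all (fun person => PySem.Set.contains (pvCharSet person) x)) := by
  intro rest
  induction rest with
  | nil => intro init; simp
  | cons p ps ih =>
      intro init
      rw [List.foldl_cons, ih, pv_inter_def, List.filter_filter]
      refine List.filter_congr (fun x _ => ?_)
      simp [Bool.and_comm]

-- ===== VERDICT (by name: the statement is the Claim_ definition above) =====
theorem letters_in_every_person_spec : Claim_equal_letters_in_every_person := by
  intro group _
  unfold Spec_letters_in_every_person
  cases group with
  | nil => rfl
  | cons p rest =>
      rw [pv_A_filter]
      simp only [letters_in_every_person_alt]
      rw [pv_B_filter]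
      have hsplit : (p :: rest).flatMap pvChars = pvChars p ++ rest.flatMap pvChars := by
        simp
      rw [hsplit, PySem.Set.ofList_append, PySem.Set.update_eq_append_filter,
        List.filter_append]
      have hnil :
          ((PySem.Set.ofList (rest.flatMap pvChars)).filter
              (fun y => !(PySem.Set.ofList (pvChars p)).contains y)).filter
            (fun x => (p :: rest).all (fun person => PySem.Str.isIn x person)) = [] := by
        refine List.filter_eq_nil_iff.mpr (fun y hy => ?_)
        obtain ⟨hy1, hy2⟩ := List.mem_filter.mp hy
        have hy3 : y ∈ rest.flatMap pvChars := (PySem.Set.mem_ofList _ _).mp hy1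
        obtain ⟨person0, _, hyc⟩ := List.mem_flatMap.mp hy3
        obtain ⟨c, _, rfl⟩ := (pv_mem_chars _ _).mp hyc
        intro hall
        simp only [List.all_cons, Bool.and_eq_true] at hall
        have hcp : c ∈ p.toList := (pv_isIn_chars c p).mp hall.1
        have hmem : String.ofList [c] ∈ PySem.Set.ofList (pvChars p) :=
          (PySem.Set.mem_ofList _ _).mpr ((pv_mem_chars _ _).mpr ⟨c, hcp, rfl⟩)
        have hy2' : ¬ (PySem.Set.ofList (pvChars p)).contains (String.ofList [c]) = true := by
          simpa using hy2
        exact hy2' ((PySem.Set.contains_iff _ _).mpr hmem)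
      rw [hnil, List.append_nil]
      refine List.filter_congr (fun x hx => ?_)
      obtain ⟨c, hcp, rfl⟩ := (pv_mem_chars _ _).mp ((PySem.Set.mem_ofList _ _).mp hx)
      rw [Bool.eq_iff_iff]
      simp only [List.all_cons, Bool.and_eq_true, List.all_eq_true]
      constructor
      · intro h person hpers
        exact (PySem.Set.contains_iff _ _).mpr
          ((pv_mem_charSet c person).mpr ((pv_isIn_chars c person).mp (h.2 person hpers)))
      · intro h
        refine ⟨(pv_isIn_chars c p).mpr hcp, fun person hpers => ?_⟩
        exact (pv_isIn_chars c person).mpr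
          ((pv_mem_charSet c person).mp ((PySem.Set.contains_iff _ _).mp (h person hpers)))
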